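-- pv_equiv track=rewrite | github.com/jazzking7/HEGEMONY-Online-Version | Backend/game_state_manager.py | leyline_probability
-- ===== SOURCE A (Python) =====
-- def leyline_probability(num_leylines, hasBuff):
--     if num_leylines < 1:
--         return 0  # no leylines means no probability
--
--     prob = 17
--     increment = 5
--
--     if hasBuff:
--         prob = 18
--         increment = 6
--
--     for i in range(2, num_leylines + 1):
--         prob += increment
--         increment += 1
--
--     if hasBuff:
--         if prob > 80:
--             prob = 80
--     else:
--         if prob > 60:
--             prob = 60
--     return prob
-- ===== SOURCE B (Python) =====
-- def leyline_probability(num_leylines, hasBuff):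
--     if num_leylines < 1:
--         return 0
--     base, inc, cap = (18, 6, 80) if hasBuff else (17, 5, 60)
--     m = num_leylines - 1
--     return min(base + inc * m + m * (m - 1) // 2, cap)
-- ===== Notes on version B (the rewrite author's own statement) =====
-- stated objective: faster
-- what changed: Replaced the per-leyline increment loop by the closed-form arithmetic-series sum base + inc*(n-1) + (n-1)(n-2)/2, capped with min.
import Mathlib
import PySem

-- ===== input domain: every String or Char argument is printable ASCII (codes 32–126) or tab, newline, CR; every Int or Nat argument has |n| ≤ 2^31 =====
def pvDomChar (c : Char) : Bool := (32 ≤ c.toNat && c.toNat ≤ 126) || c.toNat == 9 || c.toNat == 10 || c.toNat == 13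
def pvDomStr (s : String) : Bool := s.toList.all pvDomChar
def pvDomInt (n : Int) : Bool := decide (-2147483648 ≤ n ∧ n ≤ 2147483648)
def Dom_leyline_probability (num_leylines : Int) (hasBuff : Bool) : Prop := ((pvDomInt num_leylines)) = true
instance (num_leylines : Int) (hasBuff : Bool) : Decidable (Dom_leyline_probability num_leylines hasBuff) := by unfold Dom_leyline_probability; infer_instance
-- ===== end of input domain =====

-- ===== PORT A =====
-- B replaces A's increment loop by the closed-form arithmetic-series sum (O(1) instead of O(n)).
def leyline_probability (num_leylines : Int) (hasBuff : Bool) : Int :=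
  if num_leylines < 1 then 0
  else
    let prob : Int := if hasBuff then 18 else 17
    let increment : Int := if hasBuff then 6 else 5
    let st := (PySem.List.pyRange 2 (num_leylines + 1) 1).foldl
      (fun (s : Int × Int) _ => (s.1 + s.2, s.2 + 1)) (prob, increment)
    let prob := st.1
    if hasBuff then (if prob > 80 then 80 else prob)
    else (if prob > 60 then 60 else prob)

-- ===== PORT B =====
def leyline_probability_alt (num_leylines : Int) (hasBuff : Bool) : Int :=
  if num_leylines < 1 then 0
  else
    let base : Int := if hasBuff then 18 else 17
    let inc : Int := if hasBuff then 6 else 5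
    let cap : Int := if hasBuff then 80 else 60
    let m := num_leylines - 1
    min (base + inc * m + PySem.Int.floordiv (m * (m - 1)) 2) cap

-- ===== PRECONDITION & SPEC =====
def Spec_leyline_probability (num_leylines : Int) (hasBuff : Bool) (out : Int) : Prop := out = leyline_probability_alt num_leylines hasBuff
instance (num_leylines : Int) (hasBuff : Bool) (out : Int) : Decidable (Spec_leyline_probability num_leylines hasBuff out) := by unfold Spec_leyline_probability; infer_instance

-- ===== CLAIM (what is proved, stated in full; the proofs are below) =====
def Claim_equal_leyline_probability : Prop := ∀ (num_leylines : Int) (hasBuff : Bool), Dom_leyline_probability num_leylines hasBuff → Spec_leyline_probability num_leylines hasBuff (leyline_probability num_leylines hasBuff)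

-- ===== LEMMAS AND PROOFS =====

-- ===== VERDICT (by name: the statement is the Claim_ definition above) =====
-- triangular helper: tri k = 0 + 1 + ... + (k-1)
def pvTri : Nat → Int
  | 0 => 0
  | k + 1 => pvTri k + k

theorem pvTri_succ_eq (k : Nat) : pvTri (k + 1) = pvTri k + k := rfl

theorem pvTri_two_mul (k : Nat) : 2 * pvTri k = (k : Int) * (k - 1) := by
  induction k with
  | zero => simp [pvTri]
  | succ k ih => simp only [pvTri_succ_eq]; push_cast; push_cast at ih; ring_nf; ring_nf at ih; omega

theorem pv_foldl_closed (l : List Int) (p i : Int) :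
    l.foldl (fun (s : Int × Int) _ => (s.1 + s.2, s.2 + 1)) (p, i)
      = (p + i * l.length + pvTri l.length, i + l.length) := by
  induction l generalizing p i with
  | nil => simp [pvTri]
  | cons x xs ih =>
      simp only [List.foldl_cons, List.length_cons, ih, Prod.mk.injEq, pvTri_succ_eq]
      refine ⟨by push_cast; ring, by push_cast; ring⟩

theorem leyline_probability_spec : Claim_equal_leyline_probability := by
  intro n hb _
  unfold Spec_leyline_probability leyline_probability leyline_probability_alt
  by_cases h : n < 1
  · simp [h]
  · have hcast : (((n - 1).toNat : Int)) = n - 1 := by omega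
    have hlen : (PySem.List.pyRange 2 (n + 1) 1).length = (n - 1).toNat := by
      rw [PySem.List.length_pyRange_one]; omega
    have hfd : PySem.Int.floordiv ((n - 1) * (n - 1 - 1)) 2 = pvTri (n - 1).toNat := by
      have h2 := pvTri_two_mul (n - 1).toNat
      rw [hcast] at h2
      rw [PySem.Int.floordiv_eq_ediv_of_pos (by norm_num)]
      omega
    simp only [if_neg h, pv_foldl_closed, hlen, hcast, hfd]
    cases hb
    · rw [min_def]
      split_ifs <;> omega
    · rw [min_def]
      split_ifs <;> omega
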